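-- pv_equiv track=rewrite | github.com/hansic7/Algorithm | 프로그래머스/lv2/12913. 땅따먹기/땅따먹기.py | solution
-- ===== SOURCE A (Python) =====
-- def solution(land):
--     answer = 0
--
--     arr = [[0]*4 for i in range(len(land))]
--
--     for i in range(4):
--         arr[0][i] = land[0][i]
--
--     for i in range(len(land)):
--         for j in range(4):
--             temp = []
--             for z in range(4):
--                 if z != j: temp.append(arr[i-1][z])
--             arr[i][j] = land[i][j] + max(temp)
--
--     return max(arr[len(land)-1])
-- ===== SOURCE B (Python) =====
-- def solution(land):
--     prev = list(land[0][:4])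
--     for row in land[1:]:
--         m1 = max(prev)
--         j1 = prev.index(m1)
--         m2 = max(prev[z] for z in range(4) if z != j1)
--         prev = [row[j] + (m2 if j == j1 else m1) for j in range(4)]
--     return max(prev)
-- ===== Notes on version B (the rewrite author's own statement) =====
-- stated objective: simpler
-- what changed: B replaces A's full n-by-4 table and per-column rebuild of a temp list (12 reads + a max scan per column) by a rolling previous row from which it precomputes the maximum, its first index and the maximum excluding that index once per row, then fills the new row in a single pass. Pre_ excludes single-row inputs, on which A's only iteration reads arr[-1] (the row being rewritten in place) and returns an accidental cascaded sum while B returns the row maximum.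
-- outside the precondition, e.g. on solution([[1, 2, 3, 5]]): A returns 16, B returns 5
import Mathlib
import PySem

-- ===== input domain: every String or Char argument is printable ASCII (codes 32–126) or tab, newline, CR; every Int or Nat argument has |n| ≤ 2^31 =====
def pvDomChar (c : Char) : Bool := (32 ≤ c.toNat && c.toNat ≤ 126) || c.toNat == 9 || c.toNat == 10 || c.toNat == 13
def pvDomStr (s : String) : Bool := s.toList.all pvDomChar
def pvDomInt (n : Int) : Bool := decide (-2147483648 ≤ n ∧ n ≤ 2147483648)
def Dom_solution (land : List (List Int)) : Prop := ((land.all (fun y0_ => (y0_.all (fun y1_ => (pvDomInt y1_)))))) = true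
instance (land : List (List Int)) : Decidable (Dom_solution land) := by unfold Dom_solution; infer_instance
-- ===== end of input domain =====

-- B keeps only a rolling previous row and precomputes its max, argmax and max-excluding-argmax
-- once per row instead of A's full table and per-column temp-list rebuild.


-- ===== PORT A =====
-- max(xs) for a nonempty list (Python raises on []; never applied to [] under Pre_)
def pvMax (xs : List Int) : Int := (PySem.List.max? xs (fun y => y)).getD 0

-- body of A's inner 'for j in range(4)' loop (temp build + arr[i][j] assignment)
def pvInnerA (land arr : List (List Int)) (i j : Int) : List (List Int) :=
  let temp : List Int := (PySem.List.pyRange 0 4 1).foldl (fun temp z =>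
      if z ≠ j then temp ++ [PySem.List.pyGetD (PySem.List.pyGetD arr (i - 1) []) z 0] else temp) []
  PySem.List.pySetD arr i (PySem.List.pySetD (PySem.List.pyGetD arr i []) j
    (PySem.List.pyGetD (PySem.List.pyGetD land i []) j 0 + pvMax temp))

-- body of A's outer 'for i in range(len(land))' loop
def pvBodyA (land arr : List (List Int)) (i : Int) : List (List Int) :=
  (PySem.List.pyRange 0 4 1).foldl (fun arr j => pvInnerA land arr i j) arr

def solution (land : List (List Int)) : Int :=
  let n : Int := (land.length : Int)
  -- arr = [[0]*4 for i in range(len(land))]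
  let arr0 : List (List Int) := (PySem.List.pyRange 0 n 1).map (fun _ => List.replicate 4 (0 : Int))
  -- for i in range(4): arr[0][i] = land[0][i]
  let arr1 : List (List Int) := (PySem.List.pyRange 0 4 1).foldl (fun arr i =>
      PySem.List.pySetD arr 0 (PySem.List.pySetD (PySem.List.pyGetD arr 0 [])
        i (PySem.List.pyGetD (PySem.List.pyGetD land 0 []) i 0))) arr0
  -- for i in range(len(land)): for j in range(4): ...
  let arr2 : List (List Int) := (PySem.List.pyRange 0 n 1).foldl (pvBodyA land) arr1
  pvMax (PySem.List.pyGetD arr2 (n - 1) [])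

-- ===== PORT B =====
-- body of B's 'for row in land[1:]' loop
def pvBodyB (prev row : List Int) : List Int :=
  let m1 : Int := pvMax prev
  let j1 : Int := (((PySem.List.index? prev m1).getD 0 : Nat) : Int)
  let m2 : Int := pvMax ((PySem.List.pyRange 0 4 1).foldl (fun acc z =>
      if z ≠ j1 then acc ++ [PySem.List.pyGetD prev z 0] else acc) [])
  (PySem.List.pyRange 0 4 1).map (fun j =>
    PySem.List.pyGetD row j 0 + (if j = j1 then m2 else m1))

def solution_alt (land : List (List Int)) : Int :=
  -- prev = list(land[0][:4])
  let prev0 : List Int := PySem.List.slice (PySem.List.pyGetD land 0 []) none (some 4)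
  let last : List Int := (PySem.List.slice land (some 1) none).foldl pvBodyB prev0
  pvMax last

-- ===== PRECONDITION & SPEC =====
-- Every row must be at least 4 wide (else A raises IndexError). Pre_ also excludes single-row
-- inputs, on which A still returns: there A's only loop iteration reads arr[-1] — the very row it
-- is itself rewriting — so its value is an accident of the in-place update order (16 on
-- [[1,2,3,5]]), while B naturally returns the row maximum (5); no equivalence is claimed there.
def Pre_solution (land : List (List Int)) : Prop :=
  2 ≤ land.length ∧ ∀ row ∈ land, 4 ≤ row.length
instance (land : List (List Int)) : Decidable (Pre_solution land) := by
  unfold Pre_solution; infer_instance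

def pvWitness_solution : List (List Int) := [[1, 2, 3, 5], [5, 6, 7, 8], [4, 3, 2, 1]]

def Spec_solution (land : List (List Int)) (out : Int) : Prop := out = solution_alt land
instance (land : List (List Int)) (out : Int) : Decidable (Spec_solution land out) := by
  unfold Spec_solution; infer_instance

-- ===== CLAIM (what is proved, stated in full; the proofs are below) =====
def Claim_equal_solution : Prop :=
  ∀ (land : List (List Int)), Dom_solution land → Pre_solution land →
    Spec_solution land (solution land)

-- ===== LEMMAS AND PROOFS =====

-- the all-zero row
def pvZ : List Int := List.replicate 4 0

-- A's temp list for previous row p and excluded column j, and the resulting max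
def pvEm (p : List Int) (j : Int) : Int :=
  pvMax ((PySem.List.pyRange 0 4 1).foldl (fun t z =>
      if z ≠ j then t ++ [PySem.List.pyGetD p z 0] else t) [])

-- the mathematical row transition both programs implement
def pvStep (p row : List Int) : List Int :=
  (PySem.List.pyRange 0 4 1).map (fun j => PySem.List.pyGetD row j 0 + pvEm p j)

-- successive rows produced from p by the given land rows
def pvScan (p : List Int) : List (List Int) → List (List Int)
  | [] => []
  | r :: rs => pvStep p r :: pvScan (pvStep p r) rs

theorem pvScan_length (rows : List (List Int)) : ∀ p, (pvScan p rows).length = rows.length := by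
  induction rows with
  | nil => intro p; rfl
  | cons r rs ih => intro p; simp [pvScan, ih]

theorem pvStep_length (p row : List Int) : (pvStep p row).length = 4 := rfl

-- max characterisation
theorem pvMax_eq (xs : List Int) (x : Int) (hx : x ∈ xs) (hmax : ∀ y ∈ xs, y ≤ x) :
    pvMax xs = x := by
  have hne : xs ≠ [] := List.ne_nil_of_mem hx
  obtain ⟨m, hm⟩ : ∃ m, PySem.List.max? xs (fun y => y) = some m := by
    cases h : PySem.List.max? xs (fun y => y) with
    | none => exact absurd ((PySem.List.max?_eq_none_iff xs _).mp h) hne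
    | some m => exact ⟨m, rfl⟩
  have h1 : m ∈ xs := PySem.List.max?_mem hm
  have h2 := PySem.List.max?_isMax hm
  simp only [pvMax, hm, Option.getD_some]
  exact le_antisymm (hmax m h1) (h2 x hx)

theorem pvMax_mem (xs : List Int) (h : xs ≠ []) : pvMax xs ∈ xs := by
  obtain ⟨m, hm⟩ : ∃ m, PySem.List.max? xs (fun y => y) = some m := by
    cases hh : PySem.List.max? xs (fun y => y) with
    | none => exact absurd ((PySem.List.max?_eq_none_iff xs _).mp hh) h
    | some m => exact ⟨m, rfl⟩
  simpa [pvMax, hm] using PySem.List.max?_mem hm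

theorem pvMax_isMax (xs : List Int) (y : Int) (hy : y ∈ xs) : y ≤ pvMax xs := by
  obtain ⟨m, hm⟩ : ∃ m, PySem.List.max? xs (fun y => y) = some m := by
    cases hh : PySem.List.max? xs (fun y => y) with
    | none => simp [(PySem.List.max?_eq_none_iff xs _).mp hh] at hy
    | some m => exact ⟨m, rfl⟩
  simpa [pvMax, hm] using PySem.List.max?_isMax hm y hy

-- B-side: one row transition equals the mathematical step
theorem pvEm_eq_max (p : List Int) (hp : p.length = 4) (j : Int)
    (i : Nat) (hi : i < 4) (hne : (i : Int) ≠ j) (hval : p.getD i 0 = pvMax p) :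
    pvEm p j = pvMax p := by
  have hfilter : (PySem.List.pyRange 0 4 1).foldl
      (fun t z => if z ≠ j then t ++ [PySem.List.pyGetD p z 0] else t) []
      = ((PySem.List.pyRange 0 4 1).filter (fun z => z ≠ j)).map (fun z => PySem.List.pyGetD p z 0) := by
    simpa using PySem.List.foldl_append_if (fun z => decide (z ≠ j))
      (fun z => PySem.List.pyGetD p z 0) (PySem.List.pyRange 0 4 1) []
  rw [pvEm, hfilter]
  apply pvMax_eq
  · refine List.mem_map.mpr ⟨(i : Int), List.mem_filter.mpr ⟨?_, by simpa using hne⟩, ?_⟩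
    · exact PySem.List.mem_pyRange_one.mpr ⟨by positivity, by exact_mod_cast hi⟩
    · rw [PySem.List.pyGetD_natCast, hval]
  · intro y hy
    obtain ⟨z, hz, rfl⟩ := List.mem_map.mp hy
    have hz' := PySem.List.mem_pyRange_one.mp (List.mem_filter.mp hz).1
    exact pvMax_isMax p _ (PySem.List.pyGetD_mem p 0 ⟨by omega, by omega⟩)

theorem bodyB_eq_step (p row : List Int) (hp : p.length = 4) : pvBodyB p row = pvStep p row := by
  have hpne : p ≠ [] := by intro h; rw [h] at hp; simp at hp
  obtain ⟨i, hi⟩ : ∃ i, PySem.List.index? p (pvMax p) = some i := by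
    cases h : PySem.List.index? p (pvMax p) with
    | none => exact absurd (List.idxOf?_eq_none_iff.mp h) (by simp [pvMax_mem p hpne])
    | some i => exact ⟨i, rfl⟩
  obtain ⟨hilt, hival, -⟩ := List.idxOf?_eq_some_iff.mp hi
  have hival' : p.getD i 0 = pvMax p := by rw [List.getD_eq_getElem _ _ hilt, hival]
  rw [pvBodyB, pvStep, hi]
  simp only [Option.getD_some]
  apply List.map_congr_left
  intro j hj
  have hj' := PySem.List.mem_pyRange_one.mp hj
  by_cases hji : j = (i : Int)
  · rw [if_pos hji, hji]
    rfl
  · rw [if_neg hji, pvEm_eq_max p hp j i (by omega) (fun h => hji h.symm) hival']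

theorem scan_getLast (rows : List (List Int)) :
    ∀ (p : List Int), (p :: pvScan p rows).getLast (List.cons_ne_nil _ _) = rows.foldl pvStep p := by
  induction rows with
  | nil => intro p; rfl
  | cons r rs ih =>
    intro p
    rw [show pvScan p (r :: rs) = pvStep p r :: pvScan (pvStep p r) rs from rfl,
        List.getLast_cons (List.cons_ne_nil _ _)]
    exact ih (pvStep p r)

theorem foldB_eq_foldStep (rows : List (List Int)) :
    ∀ (p : List Int), p.length = 4 → rows.foldl pvBodyB p = rows.foldl pvStep p := by
  induction rows with
  | nil => intro p _; rfl
  | cons r rs ih =>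
    intro p hp
    rw [List.foldl_cons, List.foldl_cons, bodyB_eq_step p r hp, ih _ (pvStep_length p r)]

theorem getD_eq_getLast {α : Type} (L : List α) (h : L ≠ []) (d : α) (i : Nat)
    (hi : i = L.length - 1) : L.getD i d = L.getLast h := by
  subst hi
  rw [List.getD_eq_getElem _ _ (by cases L with | nil => simp at h | cons x xs => simp),
      List.getLast_eq_getElem]

theorem innerA_eq (land arr : List (List Int)) (k : Nat) (hk : k < arr.length)
    (h4 : (arr.getD k []).length = 4)
    (hstab : ∀ v, PySem.List.pyGetD (arr.set k v) ((k : Int) - 1) [] =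
        PySem.List.pyGetD arr ((k : Int) - 1) []) :
    pvBodyA land arr (k : Int) =
      arr.set k (pvStep (PySem.List.pyGetD arr ((k : Int) - 1) []) (PySem.List.pyGetD land (k : Int) [])) := by
  have hInner : ∀ (arr' : List (List Int)) (j : Int), pvInnerA land arr' (k : Int) j =
      PySem.List.pySetD arr' (k : Int) (PySem.List.pySetD (PySem.List.pyGetD arr' (k : Int) []) j
        (PySem.List.pyGetD (PySem.List.pyGetD land (k : Int) []) j 0 +
          pvEm (PySem.List.pyGetD arr' ((k : Int) - 1) []) j)) := by
    intro arr' j; rfl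
  obtain ⟨a, b, c, d, hrow⟩ := List.length_eq_four.mp h4
  simp only [pvBodyA, show PySem.List.pyRange 0 4 1 = [0,1,2,3] from rfl,
    List.foldl_cons, List.foldl_nil, hInner]
  simp only [PySem.List.pySetD_natCast, PySem.List.pyGetD_natCast, hstab,
    List.getD_eq_getElem _ _ (by simp [hk] : k < (arr.set k _).length),
    List.getElem_set_self, List.set_set]
  rw [hrow]
  simp [PySem.List.pySetD_of_nonneg, pvStep, show PySem.List.pyRange 0 4 1 = [0,1,2,3] from rfl]

theorem outerA (land : List (List Int)) :
    ∀ (m : Nat) (R : List (List Int)) (hR : R ≠ []),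
      R.length + m = land.length →
      (PySem.List.pyRange (R.length : Int) (land.length : Int) 1).foldl (pvBodyA land)
          (R ++ List.replicate m pvZ)
        = R ++ pvScan (R.getLast hR) (land.drop R.length) := by
  intro m
  induction m with
  | zero =>
    intro R hR hlen
    have hd : List.drop R.length land = [] := List.drop_eq_nil_of_le (by omega)
    rw [PySem.List.pyRange_one_eq_nil (by exact_mod_cast hlen.ge)]
    simp [hd, pvScan]
  | succ m ih =>
    intro R hR hlen
    have hk0 : 0 < R.length := List.length_pos_iff.mpr hR
    have hklt : R.length < land.length := by omega
    have harr : R ++ List.replicate (m + 1) pvZ = R ++ pvZ :: List.replicate m pvZ := by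
      simp [List.replicate_succ]
    have hkltarr : R.length < (R ++ pvZ :: List.replicate m pvZ).length := by simp
    have hgetk : (R ++ pvZ :: List.replicate m pvZ).getD R.length [] = pvZ := by
      rw [List.getD_eq_getElem _ _ hkltarr, List.getElem_append_right (le_refl R.length)]
      simp
    have hcast : ((R.length : Int) - 1) = ((R.length - 1 : Nat) : Int) := by push_cast [hk0]; omega
    have hstab : ∀ v, PySem.List.pyGetD ((R ++ pvZ :: List.replicate m pvZ).set R.length v)
        ((R.length : Int) - 1) [] =
        PySem.List.pyGetD (R ++ pvZ :: List.replicate m pvZ) ((R.length : Int) - 1) [] := by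
      intro v
      rw [hcast, PySem.List.pyGetD_natCast, PySem.List.pyGetD_natCast,
          List.getD_eq_getElem _ _ (by simp; omega), List.getD_eq_getElem _ _ (by simp; omega),
          List.getElem_set_ne (by omega)]
    have hp : PySem.List.pyGetD (R ++ pvZ :: List.replicate m pvZ) ((R.length : Int) - 1) []
        = R.getLast hR := by
      rw [hcast, PySem.List.pyGetD_natCast, List.getD_eq_getElem _ _ (by simp; omega),
          List.getElem_append_left (by omega), List.getLast_eq_getElem]
    have hrowk : PySem.List.pyGetD land (R.length : Int) [] = land[R.length]'hklt := by
      rw [PySem.List.pyGetD_natCast, List.getD_eq_getElem _ _ hklt]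
    have hset : (R ++ pvZ :: List.replicate m pvZ).set R.length
          (pvStep (R.getLast hR) (land[R.length]'hklt))
        = (R ++ [pvStep (R.getLast hR) (land[R.length]'hklt)]) ++ List.replicate m pvZ := by
      rw [List.set_append, if_neg (by omega), List.append_assoc]
      congr 1
      rw [Nat.sub_self]
      rfl
    rw [harr, PySem.List.pyRange_one_cons (by exact_mod_cast hklt), List.foldl_cons,
        innerA_eq land _ R.length hkltarr (by rw [hgetk]; rfl) hstab, hp, hrowk, hset]
    have hR' : (R ++ [pvStep (R.getLast hR) (land[R.length]'hklt)]) ≠ [] := by simp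
    have hih := ih (R ++ [pvStep (R.getLast hR) (land[R.length]'hklt)]) hR' (by simp; omega)
    rw [show ((R ++ [pvStep (R.getLast hR) (land[R.length]'hklt)]).length : Int)
          = (R.length : Int) + 1 by simp] at hih
    rw [hih, List.getLast_concat,
        show (R ++ [pvStep (R.getLast hR) (land[R.length]'hklt)]).length = R.length + 1 by simp,
        List.drop_eq_getElem_cons hklt,
        show ∀ (p r : List Int) rs, pvScan p (r :: rs) = pvStep p r :: pvScan (pvStep p r) rs
          from fun _ _ _ => rfl]
    simp

theorem solution_spec : Claim_equal_solution := by
  intro land _ hpre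
  obtain ⟨hn2, hrows⟩ := hpre
  rcases land with _ | ⟨r0, rest⟩
  · simp at hn2
  rcases rest with _ | ⟨r1, rs⟩
  · simp at hn2
  have hr0 : 4 ≤ r0.length := hrows r0 (by simp)
  obtain ⟨a, b, c, d, t, hr0eq⟩ : ∃ a b c d t, r0 = a :: b :: c :: d :: t := by
    rcases r0 with _ | ⟨a, _ | ⟨b, _ | ⟨c, _ | ⟨d, t⟩⟩⟩⟩  <;> simp at hr0
    exact ⟨a, b, c, d, t, rfl⟩
  subst hr0eq
  unfold Spec_solution
  simp only [solution, solution_alt]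
  -- notation
  set land := (a :: b :: c :: d :: t) :: r1 :: rs with hland
  have hn : land.length = rs.length + 2 := by simp [hland]
  set T : List (List Int) := List.replicate (rs.length + 1) pvZ with hT
  -- arr0
  have harr0 : (List.map (fun _ => List.replicate 4 (0:Int)) (PySem.List.pyRange 0 (land.length : Int) 1))
      = pvZ :: T := by
    rw [List.map_const', PySem.List.length_pyRange_one,
        show (((land.length : Int)) - 0).toNat = rs.length + 2 by omega]
    simp [pvZ, hT, List.replicate_succ]
  rw [harr0]
  -- first loop: row 0 gets land[0][:4] written in; only its shape matters
  have harr1 : (PySem.List.pyRange 0 4 1).foldl (fun arr i =>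
      PySem.List.pySetD arr 0 (PySem.List.pySetD (PySem.List.pyGetD arr 0 [])
        i (PySem.List.pyGetD (PySem.List.pyGetD land 0 []) i 0))) (pvZ :: T)
      = [a, b, c, d] :: T := by
    simp [show PySem.List.pyRange 0 4 1 = [0,1,2,3] from rfl, hland,
      PySem.List.pySetD_of_nonneg, pvZ, PySem.List.pyGetD_ofNat']
  rw [harr1]
  -- outer loop, iteration i = 0: reads arr[-1] = pvZ (the untouched last row), rewrites row 0
  have hTne : T ≠ [] := by simp [hT]
  have hstab0 : ∀ v, PySem.List.pyGetD (([a, b, c, d] :: T).set 0 v) ((0 : Nat) - 1 : Int) [] =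
      PySem.List.pyGetD ([a, b, c, d] :: T) ((0 : Nat) - 1 : Int) [] := by
    intro v
    simp only [Nat.cast_zero, zero_sub]
    rw [show ([a, b, c, d] :: T).set 0 v = v :: T from rfl,
        PySem.List.pyGetD_neg_one _ _ (List.cons_ne_nil _ _),
        PySem.List.pyGetD_neg_one _ _ (List.cons_ne_nil _ _),
        List.getLast_cons hTne, List.getLast_cons hTne]
  have hTlast : ∀ (L : List (List Int)) (h : L ≠ []), L = List.replicate (rs.length + 1) pvZ →
      L.getLast h = pvZ := by
    intro L h hL
    subst hL
    simp
  have hlast : PySem.List.pyGetD ([a, b, c, d] :: T) ((0 : Nat) - 1 : Int) [] = pvZ := by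
    simp only [Nat.cast_zero, zero_sub]
    rw [PySem.List.pyGetD_neg_one _ _ (List.cons_ne_nil _ _), List.getLast_cons hTne]
    exact hTlast T hTne hT
  have hinner0 := innerA_eq land ([a, b, c, d] :: T) 0 (by simp) (by rfl) hstab0
  rw [hlast] at hinner0
  simp only [Nat.cast_zero, List.set_cons_zero] at hinner0
  rw [PySem.List.pyRange_one_cons (by rw [hn]; positivity), List.foldl_cons, hinner0]
  -- row 0 after iteration 0 is land[0][:4]
  have hrow0 : pvStep pvZ (PySem.List.pyGetD land 0 []) = [a, b, c, d] := by
    rw [show PySem.List.pyGetD land 0 [] = a :: b :: c :: d :: t from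
          PySem.List.pyGetD_zero_cons _ _ _]
    simp [pvStep, show PySem.List.pyRange 0 4 1 = [0, 1, 2, 3] from rfl,
      PySem.List.pyGetD_ofNat',
      show pvEm pvZ 0 = 0 from by decide, show pvEm pvZ 1 = 0 from by decide,
      show pvEm pvZ 2 = 0 from by decide, show pvEm pvZ 3 = 0 from by decide]
  rw [hrow0]
  -- remaining outer iterations via the loop invariant
  have houter := outerA land (rs.length + 1) [[a, b, c, d]] (by simp)
    (by simp only [List.length_cons, List.length_nil, hn]; omega)
  simp only [List.length_cons, List.length_nil, Nat.cast_one, List.getLast_singleton,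
    List.singleton_append, zero_add] at houter
  rw [← hT] at houter
  simp only [zero_add]
  rw [houter]
  -- final row read = last row of the scan
  have hfin : PySem.List.pyGetD ([a, b, c, d] :: pvScan [a, b, c, d] (List.drop 1 land))
      ((land.length : Int) - 1) [] = (r1 :: rs).foldl pvStep [a, b, c, d] := by
    rw [show ((land.length : Int) - 1) = ((rs.length + 1 : Nat) : Int) by rw [hn]; push_cast; ring,
        PySem.List.pyGetD_natCast,
        show List.drop 1 land = r1 :: rs from rfl,
        getD_eq_getLast _ (List.cons_ne_nil _ _) [] _ (by simp [pvScan_length])]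
    exact scan_getLast (r1 :: rs) [a, b, c, d]
  rw [hfin]
  -- B side
  rw [show PySem.List.pyGetD land 0 [] = a :: b :: c :: d :: t from
        PySem.List.pyGetD_zero_cons _ _ _,
      PySem.List.slice_to _ (by norm_num),
      show List.take ((4 : Int).toNat) (a :: b :: c :: d :: t) = [a, b, c, d] from rfl,
      PySem.List.slice_from_one,
      show List.tail land = r1 :: rs from rfl,
      foldB_eq_foldStep (r1 :: rs) [a, b, c, d] rfl]
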